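-- pv_equiv track=rewrite | github.com/chengpeng-wang/LLMSCAN | src/DFA/run.py | is_labeled
-- ===== SOURCE A (Python) =====
-- def is_labeled(function_str: str, line_number: int):
--     split_strs = function_str.split("\n")
--     line_number = min(len(split_strs) - 1, line_number + 2)
--     while 0 <= line_number <= len(split_strs) - 1:
--         if "POTENTIAL FLAW:" in split_strs[line_number]:
--             return True
--         if "FIX:" in split_strs[line_number]:
--             return False
--         line_number = line_number - 1
--     return False
-- ===== SOURCE B (Python) =====
-- def is_labeled(function_str: str, line_number: int):
--     split_strs = function_str.split("\n")
--     start = min(len(split_strs) - 1, line_number + 2)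
--     result = False
--     for i in range(start + 1):
--         line = split_strs[i]
--         if "POTENTIAL FLAW:" in line:
--             result = True
--         elif "FIX:" in line:
--             result = False
--     return result
-- ===== Notes on version B (the rewrite author's own statement) =====
-- stated objective: alternative
-- what changed: Replaces the backward early-exit while-loop from the clamped start index with a single forward pass over lines 0..start that maintains a last-seen-marker accumulator (True on a 'POTENTIAL FLAW:' line, False on a 'FIX:' line) and returns it after the loop.
import Mathlib
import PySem

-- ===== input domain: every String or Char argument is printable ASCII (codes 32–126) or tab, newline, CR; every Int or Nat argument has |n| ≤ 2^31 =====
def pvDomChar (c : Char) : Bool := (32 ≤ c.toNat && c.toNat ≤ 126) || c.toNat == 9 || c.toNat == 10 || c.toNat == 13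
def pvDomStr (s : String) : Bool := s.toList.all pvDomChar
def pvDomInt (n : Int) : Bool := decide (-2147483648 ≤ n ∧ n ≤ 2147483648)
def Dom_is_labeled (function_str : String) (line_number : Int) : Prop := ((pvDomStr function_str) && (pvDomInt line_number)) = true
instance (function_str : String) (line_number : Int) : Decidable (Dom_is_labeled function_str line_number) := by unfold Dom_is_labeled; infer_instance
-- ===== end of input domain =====

-- B replaces A's backward early-exit scan with a forward pass over lines 0..start
-- maintaining a last-seen-marker accumulator (objective: alternative decomposition).


-- ===== PORT A =====
-- the while-loop of A: scan downward from ln, early return on a marker line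
def isLabeledLoopA (split_strs : List String) (ln : Int) : Bool :=
  if h : 0 ≤ ln ∧ ln ≤ (split_strs.length : Int) - 1 then
    let line := (PySem.List.pyGet? split_strs ln).getD ""
    if PySem.Str.isIn "POTENTIAL FLAW:" line then true
    else if PySem.Str.isIn "FIX:" line then false
    else isLabeledLoopA split_strs (ln - 1)
  else false
termination_by (ln + 1).toNat
decreasing_by omega

def is_labeled (function_str : String) (line_number : Int) : Bool :=
  let split_strs := (PySem.Str.split? function_str "\n").getD []
  let line_number := min ((split_strs.length : Int) - 1) (line_number + 2)
  isLabeledLoopA split_strs line_number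

-- ===== PORT B =====
def is_labeled_alt (function_str : String) (line_number : Int) : Bool :=
  let split_strs := (PySem.Str.split? function_str "\n").getD []
  let start := min ((split_strs.length : Int) - 1) (line_number + 2)
  (PySem.List.pyRange 0 (start + 1) 1).foldl
    (fun result i =>
      let line := (PySem.List.pyGet? split_strs i).getD ""
      if PySem.Str.isIn "POTENTIAL FLAW:" line then true
      else if PySem.Str.isIn "FIX:" line then false
      else result) false

-- ===== PRECONDITION & SPEC =====
def Spec_is_labeled (function_str : String) (line_number : Int) (out : Bool) : Prop := out = is_labeled_alt function_str line_number
instance (function_str : String) (line_number : Int) (out : Bool) : Decidable (Spec_is_labeled function_str line_number out) := by unfold Spec_is_labeled; infer_instance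

-- ===== CLAIM (what is proved, stated in full; the proofs are below) =====
def Claim_equal_is_labeled : Prop := ∀ (function_str : String) (line_number : Int), Dom_is_labeled function_str line_number → Spec_is_labeled function_str line_number (is_labeled function_str line_number)

-- ===== LEMMAS AND PROOFS =====

-- The forward fold over 0..n equals the backward early-exit loop started at n.
theorem loopA_eq_fold (split_strs : List String) (n : Nat)
    (hn : (n : Int) ≤ (split_strs.length : Int) - 1) :
    isLabeledLoopA split_strs (n : Int) =
      (PySem.List.pyRange 0 ((n : Int) + 1) 1).foldl
        (fun result i =>
          let line := (PySem.List.pyGet? split_strs i).getD ""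
          if PySem.Str.isIn "POTENTIAL FLAW:" line then true
          else if PySem.Str.isIn "FIX:" line then false
          else result) false := by
  induction n with
  | zero =>
      simp only [Nat.cast_zero]
      rw [PySem.List.pyRange_one_singleton, isLabeledLoopA]
      simp only [List.foldl]
      split
      · have hneg : isLabeledLoopA split_strs (0 - 1) = false := by
          rw [isLabeledLoopA]
          split
          · omega
          · rfl
        rw [hneg]
      · omega
  | succ m ih =>
      have hm : (m : Int) ≤ (split_strs.length : Int) - 1 := by push_cast at hn ⊢; omega
      rw [isLabeledLoopA]
      have hsplit : PySem.List.pyRange 0 ((↑(m + 1) : Int) + 1) 1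
          = PySem.List.pyRange 0 ((m : Int) + 1) 1 ++ [((m : Int) + 1)] := by
        have := PySem.List.pyRange_one_succ_right (a := 0) (b := (m : Int) + 1) (by omega)
        push_cast
        push_cast at this
        exact this
      rw [hsplit, List.foldl_append]
      simp only [List.foldl]
      rw [← ih hm]
      split
      · push_cast
        have e : (m : Int) + 1 - 1 = (m : Int) := by ring
        rw [e]
      · omega

theorem main_gen (ss : List String) (ln : Int) :
    isLabeledLoopA ss (min ((ss.length : Int) - 1) (ln + 2)) =
      (PySem.List.pyRange 0 (min ((ss.length : Int) - 1) (ln + 2) + 1) 1).foldl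
        (fun result i =>
          let line := (PySem.List.pyGet? ss i).getD ""
          if PySem.Str.isIn "POTENTIAL FLAW:" line then true
          else if PySem.Str.isIn "FIX:" line then false
          else result) false := by
  set start := min ((ss.length : Int) - 1) (ln + 2) with hst
  by_cases h0 : start < 0
  · rw [isLabeledLoopA, PySem.List.pyRange_one_eq_nil (by omega)]
    simp only [List.foldl]
    split
    · omega
    · rfl
  · have hnn : 0 ≤ start := by omega
    have hle : start ≤ (ss.length : Int) - 1 := by omega
    have hcast : ((start.toNat : Int)) = start := Int.toNat_of_nonneg hnn
    rw [← hcast]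
    exact loopA_eq_fold ss start.toNat (by omega)

-- ===== VERDICT (by name: the statement is the Claim_ definition above) =====
theorem is_labeled_spec : Claim_equal_is_labeled := by
  intro function_str line_number _
  exact main_gen ((PySem.Str.split? function_str "\n").getD []) line_number
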